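-- pv_equiv track=rewrite | github.com/jwalin-shah/tensor-logic | tensor_logic/repo_graph_view.py | imports_path
-- ===== SOURCE A (Python) =====
-- from collections import deque
-- from typing import Iterable
--
-- def build_adjacency(modules: Iterable[str], imports: Iterable[tuple[str, str]]) -> dict[str, list[str]]:
--     adj = {module: [] for module in modules}
--     for src, dst in imports:
--         adj.setdefault(src, []).append(dst)
--         adj.setdefault(dst, [])
--     for dsts in adj.values():
--         dsts.sort()
--     return adj
--
-- def imports_path(modules: Iterable[str], imports: Iterable[tuple[str, str]], src: str, dst: str) -> list[str] | None:
--     adj = build_adjacency(modules, imports)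
--     if src not in adj or dst not in adj:
--         return None
--     queue = deque([src])
--     parent: dict[str, str | None] = {src: None}
--     while queue:
--         node = queue.popleft()
--         if node == dst:
--             break
--         for nxt in adj[node]:
--             if nxt in parent:
--                 continue
--             parent[nxt] = node
--             queue.append(nxt)
--     if dst not in parent:
--         return None
--     rev = [dst]
--     while parent[rev[-1]] is not None:
--         rev.append(parent[rev[-1]])
--     rev.reverse()
--     return rev
-- ===== SOURCE B (Python) =====
-- from collections import deque
-- from typing import Iterable
--
--
-- def build_adjacency(modules: Iterable[str], imports: Iterable[tuple[str, str]]) -> dict[str, list[str]]: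
--     adj = {module: [] for module in modules}
--     for src, dst in imports:
--         adj.setdefault(src, []).append(dst)
--         adj.setdefault(dst, [])
--     for dsts in adj.values():
--         dsts.sort()
--     return adj
--
--
-- def imports_path(modules: Iterable[str], imports: Iterable[tuple[str, str]], src: str, dst: str) -> list[str] | None:
--     adj = build_adjacency(modules, imports)
--     if src not in adj or dst not in adj:
--         return None
--     # BFS over a queue of partial paths: no parent dict, no reconstruction pass.
--     queue = deque([[src]])
--     visited = {src}
--     while queue:
--         path = queue.popleft()
--         node = path[-1]
--         if node == dst:
--             return path
--         for nxt in adj[node]: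
--             if nxt in visited:
--                 continue
--             visited.add(nxt)
--             queue.append(path + [nxt])
--     return None
-- ===== Notes on version B (the rewrite author's own statement) =====
-- stated objective: simpler
-- what changed: BFS now carries whole partial paths in the queue with a visited set, returning the path directly on reaching dst, instead of maintaining a parent-pointer dict and reconstructing the path backwards after the loop.
import Mathlib
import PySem

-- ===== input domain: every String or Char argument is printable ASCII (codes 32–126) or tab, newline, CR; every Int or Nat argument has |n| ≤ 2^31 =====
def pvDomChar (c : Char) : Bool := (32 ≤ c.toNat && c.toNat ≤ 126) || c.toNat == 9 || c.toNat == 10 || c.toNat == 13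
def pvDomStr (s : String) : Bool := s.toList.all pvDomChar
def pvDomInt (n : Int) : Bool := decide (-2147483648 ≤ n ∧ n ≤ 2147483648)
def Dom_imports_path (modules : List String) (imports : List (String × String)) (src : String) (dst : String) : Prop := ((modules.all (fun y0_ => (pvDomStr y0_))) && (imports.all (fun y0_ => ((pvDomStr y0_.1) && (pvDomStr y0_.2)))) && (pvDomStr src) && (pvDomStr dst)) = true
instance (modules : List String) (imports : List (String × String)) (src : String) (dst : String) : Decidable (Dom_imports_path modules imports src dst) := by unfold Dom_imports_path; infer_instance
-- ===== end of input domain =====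

-- B replaces A's parent-pointer dict + backwards path reconstruction by a BFS over a queue of
-- whole partial paths with a visited set (objective: simpler; same asymptotic cost).

-- ===== PORT A =====
-- shared helper, verbatim in both Pythons: build_adjacency
def build_adjacency (modules : List String) (imports : List (String × String)) :
    PySem.Dict String (List String) :=
  let adj := modules.foldl (fun d m => d.insert m ([] : List String)) PySem.Dict.empty
  let adj := imports.foldl
    (fun d p => ((d.modify p.1 [] (· ++ [p.2])).setdefault p.2 [])) adj
  PySem.Dict.mk (adj.items.map (fun kv => (kv.1, PySem.List.sorted kv.2 (fun x => x) false)))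

def bfsLoopA (adj : PySem.Dict String (List String)) (dst : String) :
    Nat → List String → PySem.Dict String (Option String) → PySem.Dict String (Option String)
  | 0, _, parent => parent
  | _ + 1, [], parent => parent
  | fuel + 1, node :: queue, parent =>
    if node = dst then parent
    else
      let qp := (adj.getD node []).foldl
        (fun (qp : List String × PySem.Dict String (Option String)) nxt =>
          if (qp.2.get? nxt).isSome then qp
          else (qp.1 ++ [nxt], qp.2.insert nxt (some node)))
        (queue, parent)
      bfsLoopA adj dst fuel qp.1 qp.2

def reconA (parent : PySem.Dict String (Option String)) :
    Nat → List String → List String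
  | 0, rev => rev
  | fuel + 1, rev =>
    match rev with
    | [] => []
    | x :: _ =>
      match parent.get? x with
      | some (some p) => reconA parent fuel (p :: rev)
      | _ => rev

def imports_path (modules : List String) (imports : List (String × String)) (src : String) (dst : String) : Option (List String) :=
  let adj := build_adjacency modules imports
  if !adj.contains src || !adj.contains dst then none
  else
    let parent := bfsLoopA adj dst (adj.size + 1) [src]
        (PySem.Dict.empty.insert src none)
    if (parent.get? dst).isSome then some (reconA parent (parent.size + 1) [dst])
    else none

-- ===== PORT B =====
def bfsLoopB (adj : PySem.Dict String (List String)) (dst : String) :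
    Nat → List (List String) → PySem.Set String → Option (List String)
  | 0, _, _ => none
  | _ + 1, [], _ => none
  | fuel + 1, path :: queue, visited =>
    match PySem.List.pyGet? path (-1) with
    | none => none
    | some node =>
      if node = dst then some path
      else
        let qv := (adj.getD node []).foldl
          (fun (qv : List (List String) × PySem.Set String) nxt =>
            if qv.2.contains nxt then qv
            else (qv.1 ++ [path ++ [nxt]], qv.2.add nxt))
          (queue, visited)
        bfsLoopB adj dst fuel qv.1 qv.2

def imports_path_alt (modules : List String) (imports : List (String × String)) (src : String) (dst : String) : Option (List String) :=
  let adj := build_adjacency modules imports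
  if !adj.contains src || !adj.contains dst then none
  else
    bfsLoopB adj dst (adj.size + 1) [[src]] (PySem.Set.ofList [src])

def Spec_imports_path (modules : List String) (imports : List (String × String)) (src : String) (dst : String) (out : Option (List String)) : Prop := out = imports_path_alt modules imports src dst
instance (modules : List String) (imports : List (String × String)) (src : String) (dst : String) (out : Option (List String)) : Decidable (Spec_imports_path modules imports src dst out) := by unfold Spec_imports_path; infer_instance

def Claim_equal_imports_path : Prop := ∀ (modules : List String) (imports : List (String × String)) (src : String) (dst : String), Dom_imports_path modules imports src dst → Spec_imports_path modules imports src dst (imports_path modules imports src dst)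

-- ===== LEMMAS AND PROOFS =====

def chainRev (parent : PySem.Dict String (Option String)) : List String → Prop
  | [] => False
  | [x] => parent.get? x = some none
  | x :: y :: rest => parent.get? x = some (some y) ∧ chainRev parent (y :: rest)

def AdjClosed (adj : PySem.Dict String (List String)) : Prop :=
  ∀ n l, adj.get? n = some l → ∀ v ∈ l, adj.contains v = true

lemma chainRev_head (parent : PySem.Dict String (Option String)) (x : String) (q : List String)
    (h : chainRev parent (x :: q)) : (parent.get? x).isSome := by
  cases q with
  | nil => simp [chainRev] at h; simp [h]
  | cons y rest => simp [chainRev] at h; simp [h.1]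

lemma chainRev_mem (parent : PySem.Dict String (Option String)) :
    ∀ c, chainRev parent c → ∀ x ∈ c, (parent.get? x).isSome
  | [], h, x, hx => by cases h
  | [y], h, x, hx => by
      rcases List.mem_singleton.mp hx with rfl
      simpa using chainRev_head parent x [] h
  | y :: z :: rest, h, x, hx => by
      obtain ⟨h1, h2⟩ := h
      rcases List.mem_cons.mp hx with rfl | hx'
      · simp [h1]
      · exact chainRev_mem parent (z :: rest) h2 x hx'

lemma chainRev_insert_fresh (parent : PySem.Dict String (Option String)) (n : String)
    (v : Option String) (hn : parent.get? n = none) :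
    ∀ c, chainRev parent c → chainRev (parent.insert n v) c
  | [], h => h.elim
  | [x], h => by
      have hx : x ≠ n := by
        rintro rfl; rw [show chainRev parent [x] = (parent.get? x = some none) from rfl] at h
        rw [h] at hn; cases hn
      rw [show chainRev parent [x] = (parent.get? x = some none) from rfl] at h
      show (parent.insert n v).get? x = some none
      rw [PySem.Dict.get?_insert_of_ne _ _ hx, h]
  | x :: y :: rest, h => by
      obtain ⟨h1, h2⟩ := h
      have hx : x ≠ n := by rintro rfl; rw [h1] at hn; cases hn
      exact ⟨by rw [PySem.Dict.get?_insert_of_ne _ _ hx, h1],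
        chainRev_insert_fresh parent n v hn (y :: rest) h2⟩

lemma reconA_of_chain (parent : PySem.Dict String (Option String)) :
    ∀ (q : List String) (x : String) (acc : List String) (fuel : Nat),
      chainRev parent (x :: q) → (x :: q).length ≤ fuel →
      reconA parent fuel (x :: acc) = (x :: q).reverse ++ acc
  | [], x, acc, fuel, h, hf => by
      obtain ⟨f, rfl⟩ : ∃ f, fuel = f + 1 := ⟨fuel - 1, by simp at hf; omega⟩
      rw [show chainRev parent [x] = (parent.get? x = some none) from rfl] at h
      simp [reconA, h]
  | y :: rest, x, acc, fuel, h, hf => by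
      obtain ⟨f, rfl⟩ : ∃ f, fuel = f + 1 := ⟨fuel - 1, by simp at hf; omega⟩
      obtain ⟨h1, h2⟩ := h
      have := reconA_of_chain parent rest y (x :: acc) f h2 (by simp at hf ⊢; omega)
      simp [reconA, h1, this]

lemma forall2_append {α β : Type} {R : α → β → Prop} {l₁ u₁ : List α} {l₂ u₂ : List β}
    (h : List.Forall₂ R l₁ l₂) (h' : List.Forall₂ R u₁ u₂) :
    List.Forall₂ R (l₁ ++ u₁) (l₂ ++ u₂) := by
  induction h with
  | nil => simpa
  | cons hr _ ih => exact List.Forall₂.cons hr ih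

def PRel (parent : PySem.Dict String (Option String)) (n : String) (p : List String) : Prop :=
  ∃ q, p.reverse = n :: q ∧ chainRev parent (n :: q) ∧ (n :: q).Nodup

structure BfsInv (adj : PySem.Dict String (List String)) (dst : String)
    (queueA : List String) (parent : PySem.Dict String (Option String))
    (queueB : List (List String)) (visited : List String) : Prop where
  rel : List.Forall₂ (PRel parent) queueA queueB
  sync : ∀ x, x ∈ visited ↔ (parent.get? x).isSome = true
  nodk : parent.keys.Nodup
  keysub : ∀ x, (parent.get? x).isSome = true → adj.contains x = true
  dstq : (parent.get? dst).isSome = true → dst ∈ queueA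

lemma size_eq_keys_length {ν : Type} (d : PySem.Dict String ν) : d.size = d.keys.length := by
  simp [PySem.Dict.size, PySem.Dict.keys]

lemma size_le_of_keysub (adj : PySem.Dict String (List String))
    (parent : PySem.Dict String (Option String)) (nodk : parent.keys.Nodup)
    (keysub : ∀ x, (parent.get? x).isSome = true → adj.contains x = true) :
    parent.size ≤ adj.size := by
  rw [size_eq_keys_length, size_eq_keys_length]
  refine (List.Nodup.subperm nodk ?_).length_le
  intro x hx
  have hc : parent.contains x = true := (PySem.Dict.contains_iff_mem_keys _ _).mpr hx
  rw [PySem.Dict.contains_eq_isSome_get?] at hc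
  exact (PySem.Dict.contains_iff_mem_keys _ _).mp (keysub x hc)

lemma chain_length_le (parent : PySem.Dict String (Option String)) (c : List String)
    (h : chainRev parent c) (hnd : c.Nodup) :
    c.length ≤ parent.size := by
  rw [size_eq_keys_length]
  refine (List.Nodup.subperm hnd ?_).length_le
  intro x hx
  have := chainRev_mem parent c h x hx
  have hc : parent.contains x = true := by rw [PySem.Dict.contains_eq_isSome_get?]; exact this
  exact (PySem.Dict.contains_iff_mem_keys _ _).mp hc

lemma PRelMono (parent : PySem.Dict String (Option String)) (n : String) (v : Option String)
    (hn : parent.get? n = none) (m : String) (p : List String) (h : PRel parent m p) :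
    PRel (parent.insert n v) m p := by
  obtain ⟨q, h1, h2, h3⟩ := h
  exact ⟨q, h1, chainRev_insert_fresh parent n v hn _ h2, h3⟩

lemma pyGet_last {α : Type} (l : List α) (x : α) :
    PySem.List.pyGet? (l ++ [x]) (-1) = some x := by
  simp [PySem.List.pyGet?, PySem.List.pyIdx?]

lemma fold_step (adj : PySem.Dict String (List String)) (dst node : String)
    (q p : List String) (hp : p.reverse = node :: q)
    (L : List String) (restA : List String) (parent : PySem.Dict String (Option String))
    (restB : List (List String)) (visited : List String)
    (hL : ∀ v ∈ L, adj.contains v = true)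
    (inv : BfsInv adj dst restA parent restB visited)
    (hch : chainRev parent (node :: q)) (hnd : (node :: q).Nodup) :
      (BfsInv adj dst
          (L.foldl (fun (qp : List String × PySem.Dict String (Option String)) nxt =>
            if (qp.2.get? nxt).isSome then qp
            else (qp.1 ++ [nxt], qp.2.insert nxt (some node))) (restA, parent)).1
          (L.foldl (fun (qp : List String × PySem.Dict String (Option String)) nxt =>
            if (qp.2.get? nxt).isSome then qp
            else (qp.1 ++ [nxt], qp.2.insert nxt (some node))) (restA, parent)).2
          (L.foldl (fun (qv : List (List String) × PySem.Set String) nxt =>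
            if qv.2.contains nxt then qv
            else (qv.1 ++ [p ++ [nxt]], qv.2.add nxt)) (restB, visited)).1
          (L.foldl (fun (qv : List (List String) × PySem.Set String) nxt =>
            if qv.2.contains nxt then qv
            else (qv.1 ++ [p ++ [nxt]], qv.2.add nxt)) (restB, visited)).2) ∧
      ((L.foldl (fun (qp : List String × PySem.Dict String (Option String)) nxt =>
            if (qp.2.get? nxt).isSome then qp
            else (qp.1 ++ [nxt], qp.2.insert nxt (some node))) (restA, parent)).1.length
          + parent.size
        = restA.length
          + (L.foldl (fun (qp : List String × PySem.Dict String (Option String)) nxt =>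
            if (qp.2.get? nxt).isSome then qp
            else (qp.1 ++ [nxt], qp.2.insert nxt (some node))) (restA, parent)).2.size) := by
  induction L generalizing restA parent restB visited with
  | nil => exact ⟨inv, rfl⟩
  | cons nxt L ih =>
    by_cases hs : (parent.get? nxt).isSome = true
    · have hv : visited.contains nxt = true :=
        List.contains_iff_mem.mpr ((inv.sync nxt).mpr hs)
      have hv2 : PySem.Set.contains visited nxt = true := hv
      simp only [List.foldl_cons, hs, if_true]
      rw [if_pos hv2]
      exact ih restA parent restB visited
        (fun v hv' => hL v (List.mem_cons_of_mem _ hv')) inv hch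
    · have hnone : parent.get? nxt = none := by
        cases h : parent.get? nxt with
        | none => rfl
        | some w => rw [h] at hs; simp at hs
      have hv : visited.contains nxt = false := by
        rw [Bool.eq_false_iff]
        intro hc; exact hs ((inv.sync nxt).mp (List.contains_iff_mem.mp hc))
      have hnmem : nxt ∉ visited := fun hm => hs ((inv.sync nxt).mp hm)
      have hadd : PySem.Set.add visited nxt = visited ++ [nxt] := by
        simp [PySem.Set.add, PySem.Set.contains, hnmem]
      have hnconq : ∀ x ∈ node :: q, x ≠ nxt := by
        intro x hx heq
        have := chainRev_mem parent _ hch x hx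
        rw [heq, hnone] at this; simp at this
      have inv' : BfsInv adj dst (restA ++ [nxt]) (parent.insert nxt (some node))
          (restB ++ [p ++ [nxt]]) (visited ++ [nxt]) := by
        refine ⟨?_, ?_, ?_, ?_, ?_⟩
        · refine forall2_append (inv.rel.imp (fun a b h => PRelMono parent nxt (some node) hnone a b h)) ?_
          refine List.Forall₂.cons ⟨node :: q, by simp [hp], ?_, ?_⟩ List.Forall₂.nil
          · exact ⟨PySem.Dict.get?_insert_self _ _ _,
              chainRev_insert_fresh parent nxt (some node) hnone _ hch⟩
          · exact List.Nodup.cons (fun hm => (hnconq nxt hm) rfl) hnd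
        · intro x
          by_cases hx : x = nxt
          · subst hx; simp [PySem.Dict.get?_insert_self]
          · rw [PySem.Dict.get?_insert_of_ne _ _ hx]
            simp only [List.mem_append, List.mem_singleton, hx, or_false]
            exact inv.sync x
        · exact PySem.Dict.nodup_keys_insert _ _ _ inv.nodk
        · intro x hx
          by_cases h : x = nxt
          · rw [h]; exact hL nxt (List.mem_cons_self ..)
          · rw [PySem.Dict.get?_insert_of_ne _ _ h] at hx
            exact inv.keysub x hx
        · intro hx
          by_cases h : dst = nxt
          · simp [h]
          · rw [PySem.Dict.get?_insert_of_ne _ _ h] at hx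
            exact List.mem_append_left _ (inv.dstq hx)
      have hch' := chainRev_insert_fresh parent nxt (some node) hnone _ hch
      have hsize : (parent.insert nxt (some node)).size = parent.size + 1 := by
        rw [PySem.Dict.size_insert]
        have hcf : parent.contains nxt = false := by
          rw [PySem.Dict.contains_eq_isSome_get?, hnone]; rfl
        simp [hcf]
      have hv2 : ¬ (PySem.Set.contains visited nxt = true) := by
        show ¬ (visited.contains nxt = true); rw [hv]; simp
      simp only [List.foldl_cons, hs, if_false, Bool.false_eq_true]
      rw [if_neg hv2, hadd]
      obtain ⟨ih1, ih2⟩ := ih (restA ++ [nxt])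
        (parent.insert nxt (some node)) (restB ++ [p ++ [nxt]]) (visited ++ [nxt])
        (fun v hv' => hL v (List.mem_cons_of_mem _ hv')) inv' hch'
      refine ⟨ih1, ?_⟩
      rw [hsize] at ih2
      simp only [List.length_append, List.length_singleton] at ih2
      omega

lemma lockstep (adj : PySem.Dict String (List String)) (dst : String) (hadj : AdjClosed adj) :
    ∀ (fuel : Nat) (queueA : List String) (parent : PySem.Dict String (Option String))
      (queueB : List (List String)) (visited : List String),
      BfsInv adj dst queueA parent queueB visited →
      queueA.length + (adj.size - parent.size) ≤ fuel →
      (if ((bfsLoopA adj dst fuel queueA parent).get? dst).isSome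
       then some (reconA (bfsLoopA adj dst fuel queueA parent)
          ((bfsLoopA adj dst fuel queueA parent).size + 1) [dst])
       else none)
      = bfsLoopB adj dst fuel queueB visited
  | 0, queueA, parent, queueB, visited, inv, hf => by
    have hq : queueA = [] := by
      cases queueA with
      | nil => rfl
      | cons a t => simp at hf
    subst hq
    have hnot : ((bfsLoopA adj dst 0 [] parent).get? dst).isSome = false := by
      simp only [bfsLoopA]
      by_cases h : (parent.get? dst).isSome
      · exact absurd (inv.dstq h) (by simp)
      · simpa using h
    simp [bfsLoopA, bfsLoopB] at hnot ⊢
    simp [hnot]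
  | fuel + 1, [], parent, queueB, visited, inv, hf => by
    have hB : queueB = [] := List.forall₂_nil_left_iff.mp inv.rel
    subst hB
    have hnot : (parent.get? dst).isSome = false := by
      by_cases h : (parent.get? dst).isSome
      · exact absurd (inv.dstq h) (by simp)
      · simpa using h
    simp [bfsLoopA, bfsLoopB, hnot]
  | fuel + 1, node :: restA, parent, queueB, visited, inv, hf => by
    obtain ⟨pth, restB, hR, htail, rfl⟩ :
        ∃ pth restB, PRel parent node pth ∧ List.Forall₂ (PRel parent) restA restB ∧
          queueB = pth :: restB := by
      cases inv.rel with
      | cons hr ht => exact ⟨_, _, hr, ht, rfl⟩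
    obtain ⟨q, hq, hch, hnd⟩ := hR
    have hpth : pth = q.reverse ++ [node] := by
      have := congrArg List.reverse hq; simpa using this
    have hget : PySem.List.pyGet? pth (-1) = some node := by
      rw [hpth]; exact pyGet_last _ _
    by_cases hnddst : node = dst
    · subst hnddst
      have hsome : (parent.get? node).isSome := chainRev_head _ _ _ hch
      simp only [bfsLoopA, bfsLoopB, hget, hsome, if_true]
      have hlen : (node :: q).length ≤ parent.size + 1 :=
        le_trans (chain_length_le parent _ hch hnd) (by omega)
      rw [reconA_of_chain parent q node [] (parent.size + 1) hch hlen]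
      rw [hpth]; simp
    · -- node ≠ dst: one fold step then induction
      have hnodesome : (parent.get? node).isSome := chainRev_head _ _ _ hch
      obtain ⟨l, hl⟩ := Option.isSome_iff_exists.mp hnodesome
      have hcontnode : adj.contains node = true := inv.keysub node hnodesome
      obtain ⟨al, hal⟩ : ∃ al, adj.get? node = some al := by
        rw [PySem.Dict.contains_eq_isSome_get?] at hcontnode
        exact Option.isSome_iff_exists.mp hcontnode
      have hgetD : adj.getD node [] = al := by
        rw [PySem.Dict.getD_eq_get?_getD, hal]; rfl
      have hL : ∀ v ∈ adj.getD node [], adj.contains v = true := by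
        rw [hgetD]; exact hadj node al hal
      have inv0 : BfsInv adj dst restA parent restB visited :=
        ⟨htail, inv.sync, inv.nodk, inv.keysub, fun h => by
          rcases List.mem_cons.mp (inv.dstq h) with h' | h'
          · exact absurd h'.symm hnddst
          · exact h'⟩
      obtain ⟨inv', hsz⟩ := fold_step adj dst node q pth hq (adj.getD node [])
        restA parent restB visited hL inv0 hch hnd
      have hmeas : (((adj.getD node []).foldl
            (fun (qp : List String × PySem.Dict String (Option String)) nxt =>
              if (qp.2.get? nxt).isSome then qp
              else (qp.1 ++ [nxt], qp.2.insert nxt (some node))) (restA, parent)).1).length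
          + (adj.size - ((adj.getD node []).foldl
            (fun (qp : List String × PySem.Dict String (Option String)) nxt =>
              if (qp.2.get? nxt).isSome then qp
              else (qp.1 ++ [nxt], qp.2.insert nxt (some node))) (restA, parent)).2.size) ≤ fuel := by
        have h1 := size_le_of_keysub adj parent inv.nodk inv.keysub
        have h2 := size_le_of_keysub adj _ inv'.nodk inv'.keysub
        simp only [List.length_cons] at hf
        omega
      have := lockstep adj dst hadj fuel _ _ _ _ inv' hmeas
      simp only [bfsLoopA, bfsLoopB, hget, if_neg hnddst]
      exact this


lemma modify_eq_insert {ν : Type} (d : PySem.Dict String ν) (k : String) (d0 : ν) (f : ν → ν) :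
    d.modify k d0 f = d.insert k (f (d.getD k d0)) := PySem.Dict.ext_iff.mpr rfl

lemma base_values_nil :
    ∀ (ms : List String) (d : PySem.Dict String (List String)),
      (∀ n l, d.get? n = some l → l = []) →
      ∀ n l, (ms.foldl (fun d m => d.insert m ([] : List String)) d).get? n = some l → l = []
  | [], d, hd, n, l, h => hd n l h
  | m :: ms, d, hd, n, l, h => by
    refine base_values_nil ms (d.insert m []) ?_ n l h
    intro n' l' h'
    rw [PySem.Dict.get?_insert] at h'
    by_cases hn : n' = m
    · rw [if_pos hn] at h'; exact (Option.some.inj h').symm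
    · rw [if_neg hn] at h'; exact hd n' l' h'

lemma closed_step (d : PySem.Dict String (List String)) (a b : String)
    (hd : AdjClosed d) : AdjClosed ((d.modify a [] (· ++ [b])).setdefault b []) := by
  rw [modify_eq_insert]
  have hcont1 : ∀ x, d.contains x = true → (d.insert a (d.getD a [] ++ [b])).contains x = true := by
    intro x hx; rw [PySem.Dict.contains_insert]; simp [hx]
  have h1 : ∀ n l, (d.insert a (d.getD a [] ++ [b])).get? n = some l →
      ∀ v ∈ l, ((d.insert a (d.getD a [] ++ [b])).contains v = true ∨ v = b) := by
    intro n l hnl v hv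
    rw [PySem.Dict.get?_insert] at hnl
    by_cases hna : n = a
    · rw [if_pos hna] at hnl
      obtain rfl := (Option.some.inj hnl).symm
      rcases List.mem_append.mp hv with h' | h'
      · rw [PySem.Dict.getD_eq_get?_getD] at h'
        cases hga : d.get? a with
        | none => rw [hga] at h'; simp at h'
        | some l0 => rw [hga] at h'; exact Or.inl (hcont1 v (hd a l0 hga v h'))
      · simp at h'; exact Or.inr h'
    · rw [if_neg hna] at hnl
      exact Or.inl (hcont1 v (hd n l hnl v hv))
  by_cases hb : (d.insert a (d.getD a [] ++ [b])).contains b = true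
  · rw [PySem.Dict.setdefault_of_contains _ _ hb]
    intro n l hnl v hv
    rcases h1 n l hnl v hv with h | h
    · exact h
    · rw [h]; exact hb
  · rw [PySem.Dict.setdefault_of_not_contains _ _ (Bool.eq_false_iff.mpr hb)]
    intro n l hnl v hv
    rw [PySem.Dict.get?_insert] at hnl
    by_cases hnb : n = b
    · rw [if_pos hnb] at hnl
      obtain rfl := (Option.some.inj hnl).symm
      simp at hv
    · rw [if_neg hnb] at hnl
      rw [PySem.Dict.contains_insert]
      rcases h1 n l hnl v hv with h | h
      · simp [h]
      · simp [h]

lemma closed_fold :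
    ∀ (imps : List (String × String)) (d : PySem.Dict String (List String)),
      AdjClosed d →
      AdjClosed (imps.foldl (fun d p => ((d.modify p.1 [] (· ++ [p.2])).setdefault p.2 [])) d)
  | [], d, hd => hd
  | p :: imps, d, hd =>
      closed_fold imps _ (closed_step d p.1 p.2 hd)

lemma get?_sortVal (k : String) :
    ∀ (l : List (String × List String)),
      (PySem.Dict.mk (l.map (fun kv => (kv.1, PySem.List.sorted kv.2 (fun x => x) false)))).get? k
        = ((PySem.Dict.mk l).get? k).map (fun v => PySem.List.sorted v (fun x => x) false)
  | [] => rfl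
  | kv :: t => by
    rw [show (kv :: t).map (fun kv => (kv.1, PySem.List.sorted kv.2 (fun x => x) false))
        = (kv.1, PySem.List.sorted kv.2 (fun x => x) false)
            :: t.map (fun kv => (kv.1, PySem.List.sorted kv.2 (fun x => x) false)) from rfl]
    rw [PySem.Dict.get?_mk_cons, PySem.Dict.get?_mk_cons]
    by_cases h : kv.1 == k
    · simp [h]
    · simp only [h, Bool.false_eq_true, if_false]
      exact get?_sortVal k t

lemma build_closed (modules : List String) (imports : List (String × String)) :
    AdjClosed (build_adjacency modules imports) := by
  have hbase : ∀ n l, ((modules.foldl (fun d m => d.insert m ([] : List String))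
      PySem.Dict.empty).get? n) = some l → l = [] := by
    refine base_values_nil modules PySem.Dict.empty ?_
    intro n l h; rw [PySem.Dict.get?_empty] at h; cases h
  have hclosed0 : AdjClosed (modules.foldl (fun d m => d.insert m ([] : List String))
      PySem.Dict.empty) := by
    intro n l h v hv
    rw [hbase n l h] at hv; simp at hv
  have hclosed1 := closed_fold imports _ hclosed0
  show AdjClosed (PySem.Dict.mk _)
  intro n l h v hv
  set d1 := imports.foldl (fun d p => ((d.modify p.1 [] (· ++ [p.2])).setdefault p.2 []))
    (modules.foldl (fun d m => d.insert m ([] : List String)) PySem.Dict.empty) with hd1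
  have hmk : PySem.Dict.mk d1.items = d1 := PySem.Dict.ext rfl
  rw [get?_sortVal, hmk] at h
  cases hg : d1.get? n with
  | none => rw [hg] at h; cases h
  | some l0 =>
    rw [hg] at h
    obtain rfl := (Option.some.inj h).symm
    have hv0 : v ∈ l0 := (PySem.List.mem_sorted _ _ _ _).mp hv
    have hc : d1.contains v = true := hclosed1 n l0 hg v hv0
    rw [PySem.Dict.contains_eq_isSome_get?] at hc ⊢
    rw [get?_sortVal, hmk]
    simp only [Option.isSome_map]
    exact hc

theorem imports_path_spec : Claim_equal_imports_path := by
  intro modules imports src dst _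
  show imports_path modules imports src dst = imports_path_alt modules imports src dst
  unfold imports_path imports_path_alt
  by_cases hs : (build_adjacency modules imports).contains src = true
  · by_cases hd : (build_adjacency modules imports).contains dst = true
    · simp only [hs, hd, Bool.not_true, Bool.or_self, Bool.false_eq_true, if_false]
      have hchain : chainRev (PySem.Dict.empty.insert src (none : Option String)) [src] := by
        show (PySem.Dict.empty.insert src (none : Option String)).get? src = some none
        exact PySem.Dict.get?_insert_self _ _ _
      have inv0 : BfsInv (build_adjacency modules imports) dst [src]
          (PySem.Dict.empty.insert src none) [[src]] (PySem.Set.ofList [src]) := by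
        refine ⟨?_, ?_, ?_, ?_, ?_⟩
        · exact List.Forall₂.cons ⟨[], by simp, hchain, by simp⟩ List.Forall₂.nil
        · intro x
          by_cases hx : x = src
          · subst hx
            simp [PySem.Set.ofList, PySem.Set.add, PySem.Dict.get?_insert_self]
          · rw [PySem.Dict.get?_insert_of_ne _ _ hx, PySem.Dict.get?_empty]
            simp [PySem.Set.ofList, PySem.Set.add, hx]
        · exact PySem.Dict.nodup_keys_insert _ _ _ PySem.Dict.nodup_keys_empty
        · intro x hx
          by_cases h : x = src
          · rw [h]; exact hs
          · rw [PySem.Dict.get?_insert_of_ne _ _ h, PySem.Dict.get?_empty] at hx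
            cases hx
        · intro hx
          by_cases h : dst = src
          · simp [h]
          · rw [PySem.Dict.get?_insert_of_ne _ _ h, PySem.Dict.get?_empty] at hx
            cases hx
      have hsz : (PySem.Dict.empty.insert src (none : Option String)).size = 1 := by
        rw [PySem.Dict.size_insert]
        simp [PySem.Dict.contains_empty, PySem.Dict.size_empty]
      have hfuel : [src].length
          + ((build_adjacency modules imports).size
            - (PySem.Dict.empty.insert src (none : Option String)).size)
          ≤ (build_adjacency modules imports).size + 1 := by
        rw [hsz]; simp; omega
      exact lockstep (build_adjacency modules imports) dst
        (build_closed modules imports) ((build_adjacency modules imports).size + 1)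
        [src] (PySem.Dict.empty.insert src none) [[src]] (PySem.Set.ofList [src]) inv0 hfuel
    · simp [hs, hd]
  · simp [hs]
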